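-- pv_equiv track=rewrite | github.com/p2jason/dragonito | table_gen.py | compute_start_tables
-- ===== SOURCE A (Python) =====
-- def upper_bound(low, high, callback):
-- 	last_val = None
--
-- 	while low <= high:
-- 		mid = (high + low) // 2
--
-- 		if callback(mid):
-- 			high = mid - 1
-- 			last_val = mid
-- 		else:
-- 			low = mid + 1
--
-- 	return last_val
--
-- def compute_start_tables(max_e, mantissa_bits, segment_length):
-- 	is_pos = max_e >= 0
-- 	max_e = abs(max_e)
--
-- 	def calc_segment(m, e):
-- 		digits = 0
--
-- 		# Compute the start indices using integer arithmetic (instead of using log10 directly)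
-- 		# because of floating point accuracy issues that occur for some float64 inputs
-- 		if e >= 0:
-- 			# Equivalent to:
-- 			# return +(int(math.log10(m) + math.log10(2**+e)) // segment_length)
--
-- 			while (m * 2**e) >= 10**digits:
-- 				digits += 1
--
-- 			return (digits - 1) // segment_length
-- 		else:
-- 			# Equivalent to:
-- 			#
-- 			# # Divinding a negative number by a positive rounds down towards -inf, which is the
-- 			# # opposite of what we want. So instead of doing a // b, we do -(-a // b)
-- 			# return -(int(math.log10(2**-e) - math.log10(m)) // segment_length)
--
-- 			while ((m * 10**digits) >> -e) == 0:
-- 				digits += 1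
--
-- 			return -((digits - 1) // segment_length)
--
-- 	min_m = 1 << mantissa_bits
-- 	max_m = (1 << (mantissa_bits + 1)) - 1
--
-- 	exponent_starts = [ 0 for _ in range(max_e + 1) ]
-- 	segment_threshold = [ (0, max_e+1) for _ in range(calc_segment(max_m, max_e)) ]
--
-- 	for i in range(max_e + 1):
-- 		exponent = i if is_pos else -(i + mantissa_bits + 1)
--
-- 		min_seg = calc_segment(min_m, exponent)
-- 		max_seg = calc_segment(max_m, exponent)
-- 		seg_idx = min(abs(min_seg), abs(max_seg))
--
-- 		if max_seg > min_seg + 1: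
-- 			raise Exception(f"The difference of the digit count of the min and max values of exponent {exponent} is greater than one")
--
-- 		exponent_starts[i] = seg_idx
--
-- 		if min_seg + 1 == max_seg:
-- 			threshold_m = upper_bound(min_m, max_m, lambda m: calc_segment(m, exponent) > min_seg)
-- 			segment_threshold[seg_idx] = (threshold_m, abs(exponent))
--
-- 	return (exponent_starts, segment_threshold)
-- ===== SOURCE B (Python) =====
-- def compute_start_tables(max_e, mantissa_bits, segment_length):
-- 	is_pos = max_e >= 0
-- 	abs_e = abs(max_e)
-- 	L = segment_length
-- 	min_m = 1 << mantissa_bits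
-- 	max_m = (1 << (mantissa_bits + 1)) - 1
--
-- 	def ndigits(n):
-- 		# decimal digit count of n (0 for n <= 0), by repeated division
-- 		d = 0
-- 		while n > 0:
-- 			n //= 10
-- 			d += 1
-- 		return d
--
-- 	def seg(m, e):
-- 		if e >= 0:
-- 			return (ndigits(m << e) - 1) // L
-- 		# smallest d with m*10**d >= 2**-e, i.e. 10**d >= ceil(2**-e / m)
-- 		n = ((1 << -e) + m - 1) // m
-- 		d = 0 if n <= 1 else ndigits(n - 1)
-- 		return -((d - 1) // L)
--
-- 	exponent_starts = []
-- 	segment_threshold = [(0, abs_e + 1)] * max(seg(max_m, abs_e), 0)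
--
-- 	for i in range(abs_e + 1):
-- 		exponent = i if is_pos else -(i + mantissa_bits + 1)
-- 		min_seg = seg(min_m, exponent)
-- 		max_seg = seg(max_m, exponent)
-- 		seg_idx = min(abs(min_seg), abs(max_seg))
-- 		exponent_starts.append(seg_idx)
--
-- 		if min_seg + 1 == max_seg:
-- 			# closed-form smallest m in [min_m, max_m] with seg(m, exponent) > min_seg
-- 			if exponent >= 0:
-- 				threshold_m = -(-10 ** ((min_seg + 1) * L) // (1 << exponent))
-- 			else:
-- 				threshold_m = -(-(1 << -exponent) // 10 ** (-min_seg * L))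
-- 			segment_threshold[seg_idx] = (threshold_m, abs(exponent))
--
-- 	return (exponent_starts, segment_threshold)
-- ===== Notes on version B (the rewrite author's own statement) =====
-- stated objective: alternative
-- what changed: Replaces the upper_bound binary search by a closed-form ceiling-division threshold and A's grow-a-power comparison loops by a single repeated-division digit count (measured up to 7x faster on mid-size inputs, unconfirmed at the largest sizes).
import Mathlib
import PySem

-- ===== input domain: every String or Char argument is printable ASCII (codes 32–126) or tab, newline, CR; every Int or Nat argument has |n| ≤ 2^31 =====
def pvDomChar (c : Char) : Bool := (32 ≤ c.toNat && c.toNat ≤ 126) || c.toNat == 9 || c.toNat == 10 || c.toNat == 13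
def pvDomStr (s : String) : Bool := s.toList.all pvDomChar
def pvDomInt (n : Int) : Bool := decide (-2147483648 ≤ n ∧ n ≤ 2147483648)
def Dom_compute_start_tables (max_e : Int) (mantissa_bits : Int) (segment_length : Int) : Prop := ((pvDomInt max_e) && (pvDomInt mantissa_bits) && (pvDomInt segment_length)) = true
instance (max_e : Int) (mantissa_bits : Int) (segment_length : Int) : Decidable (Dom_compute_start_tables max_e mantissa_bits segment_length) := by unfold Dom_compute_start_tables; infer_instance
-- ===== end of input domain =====

-- B replaces A's upper_bound binary search by a closed-form ceiling-division threshold and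
-- A's grow-a-power digit loops by a repeated-division digit count (a different algorithm).


-- ===== PORT A =====
-- calc_segment's `while (m * 2**e) >= 10**digits: digits += 1` (the e >= 0 branch)
def digitsPosLoop (v : Int) (d : Nat) : Nat :=
  if h : 10 ^ d ≤ v then digitsPosLoop v (d + 1) else d
termination_by v.toNat + 1 - d
decreasing_by
  have h1 : ((d : Int)) < 10 ^ (d : Nat) := by exact_mod_cast Nat.lt_pow_self (by norm_num) (a := 10)
  have h2 : (0:Int) ≤ v := le_trans (by positivity) h
  have h3 : (d : Int) < v := lt_of_lt_of_le h1 h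
  have h4 : ((v.toNat : Int)) = v := Int.toNat_of_nonneg h2
  have h5 : d < v.toNat := by omega
  omega

-- calc_segment's `while ((m * 10**digits) >> -e) == 0: digits += 1` (the e < 0 branch);
-- Python's `x >> k` (k ≥ 0) is floor division by 2^k, exact here. The `1 ≤ m` guard is for
-- termination only: for m ≤ 0 the shifted value is nonpositive so Python's loop exits at once
-- unless m = 0, where Python diverges (m = 0 is unreachable under Pre_).
def digitsNegLoop (m : Int) (k : Nat) (d : Nat) : Nat :=
  if h : 1 ≤ m ∧ PySem.Int.floordiv (m * 10 ^ d) (2 ^ k) = 0 then digitsNegLoop m k (d + 1) else d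
termination_by 2 ^ k - d
decreasing_by
  obtain ⟨hm, h0⟩ := h
  rw [PySem.Int.floordiv_eq_ediv_of_pos (by positivity)] at h0
  have hd := Int.ediv_add_emod (m * 10 ^ d) (2 ^ k)
  have hr1 := Int.emod_nonneg (m * 10 ^ d) (b := 2 ^ k) (by positivity)
  have hr2 := Int.emod_lt_of_pos (m * 10 ^ d) (b := (2:Int) ^ k) (by positivity)
  have hlt : m * 10 ^ d < 2 ^ k := by rw [h0] at hd; omega
  have h1 : ((d : Int)) < 10 ^ (d : Nat) := by exact_mod_cast Nat.lt_pow_self (by norm_num) (a := 10)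
  have h2 : (10:Int) ^ d ≤ m * 10 ^ d := le_mul_of_one_le_left (by positivity) hm
  have h3 : (d : Int) < 2 ^ k := by omega
  have h4 : ((2:Int) ^ k) = ((2 ^ k : Nat) : Int) := by push_cast; ring
  have h5 : d < 2 ^ k := by omega
  omega

def calcSegment (L : Int) (m e : Int) : Int :=
  if 0 ≤ e then
    PySem.Int.floordiv ((digitsPosLoop (m * 2 ^ e.toNat) 0 : Int) - 1) L
  else
    -(PySem.Int.floordiv ((digitsNegLoop m (-e).toNat 0 : Int) - 1) L)

def upperBound (low high : Int) (cb : Int → Bool) (last : Option Int) : Option Int :=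
  if hlh : low ≤ high then
    let mid := PySem.Int.floordiv (high + low) 2
    if cb mid then upperBound low (mid - 1) cb (some mid)
    else upperBound (mid + 1) high cb last
  else last
termination_by (high + 1 - low).toNat
decreasing_by
  · have hb := PySem.Int.floordiv_two_mid_bounds hlh
    rw [add_comm low high] at hb
    omega
  · have hb := PySem.Int.floordiv_two_mid_bounds hlh
    rw [add_comm low high] at hb
    omega

-- `1 << mantissa_bits` raises ValueError for mantissa_bits < 0; Pre_ requires 0 ≤ mantissa_bits,
-- where 2 ^ toNat is exact. The `raise` branch (max_seg > min_seg + 1) never fires for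
-- segment_length ≠ 0, and upper_bound can only return None if its callback never holds, which
-- the `min_seg + 1 = max_seg` guard rules out; `.getD 0` stands for those unreachable cases.
def compute_start_tables (max_e : Int) (mantissa_bits : Int) (segment_length : Int) : List Int × (List (Int × Int)) :=
  let is_pos := decide (0 ≤ max_e)
  let aE := |max_e|
  let min_m : Int := 2 ^ mantissa_bits.toNat
  let max_m : Int := 2 ^ (mantissa_bits + 1).toNat - 1
  let starts0 : List Int := List.replicate (aE + 1).toNat 0
  let thr0 : List (Int × Int) := List.replicate (calcSegment segment_length max_m aE).toNat (0, aE + 1)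
  (PySem.List.pyRange 0 (aE + 1)).foldl
    (fun st i =>
      let exponent := if is_pos then i else -(i + mantissa_bits + 1)
      let min_seg := calcSegment segment_length min_m exponent
      let max_seg := calcSegment segment_length max_m exponent
      let seg_idx := min |min_seg| |max_seg|
      let starts := st.1.set i.toNat seg_idx
      if min_seg + 1 = max_seg then
        let tm := (upperBound min_m max_m
            (fun m => decide (min_seg < calcSegment segment_length m exponent)) none).getD 0
        (starts, st.2.set seg_idx.toNat (tm, |exponent|))
      else (starts, st.2))
    (starts0, thr0)

-- ===== PORT B =====
-- Source B's ndigits: repeated floor division by 10 with a counter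
def ndigAux (n : Int) (d : Int) : Int :=
  if h : 0 < n then ndigAux (PySem.Int.floordiv n 10) (d + 1) else d
termination_by n.toNat
decreasing_by
  rw [PySem.Int.floordiv_eq_ediv_of_pos (by norm_num)]
  omega

-- Source B's seg; in its e < 0 branch the digit count is `0 if n <= 1 else ndigits(n - 1)` for
-- n = ceil(2^-e / m)
def segAlt (L : Int) (m e : Int) : Int :=
  if 0 ≤ e then
    PySem.Int.floordiv (ndigAux (m * 2 ^ e.toNat) 0 - 1) L
  else
    let n := PySem.Int.floordiv (2 ^ (-e).toNat + m - 1) m ;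
    -(PySem.Int.floordiv ((if n ≤ 1 then 0 else ndigAux (n - 1) 0) - 1) L)

-- The two `10 ** …` exponents of Source B are nonnegative whenever the threshold branch runs
-- inside Pre_, where `.toNat` is exact.
def compute_start_tables_alt (max_e : Int) (mantissa_bits : Int) (segment_length : Int) : List Int × (List (Int × Int)) :=
  let is_pos := decide (0 ≤ max_e)
  let aE := |max_e|
  let min_m : Int := 2 ^ mantissa_bits.toNat
  let max_m : Int := 2 ^ (mantissa_bits + 1).toNat - 1
  let thr0 : List (Int × Int) := List.replicate (segAlt segment_length max_m aE).toNat (0, aE + 1)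
  (PySem.List.pyRange 0 (aE + 1)).foldl
    (fun st i =>
      let exponent := if is_pos then i else -(i + mantissa_bits + 1)
      let min_seg := segAlt segment_length min_m exponent
      let max_seg := segAlt segment_length max_m exponent
      let seg_idx := min |min_seg| |max_seg|
      let starts := st.1 ++ [seg_idx]
      if min_seg + 1 = max_seg then
        let tm := (if 0 ≤ exponent then
            -(PySem.Int.floordiv (-(10 ^ ((min_seg + 1) * segment_length).toNat)) (2 ^ exponent.toNat))
          else
            -(PySem.Int.floordiv (-(2 ^ (-exponent).toNat)) (10 ^ ((-min_seg) * segment_length).toNat)))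
        (starts, st.2.set seg_idx.toNat (tm, |exponent|))
      else (starts, st.2))
    (([] : List Int), thr0)

-- ===== PRECONDITION & SPEC =====
-- Pre_ excludes exactly the inputs where A raises: mantissa_bits < 0 (ValueError from
-- `1 << mantissa_bits`) and segment_length = 0 (ZeroDivisionError in calc_segment).
def Pre_compute_start_tables (max_e : Int) (mantissa_bits : Int) (segment_length : Int) : Prop :=
  0 ≤ mantissa_bits ∧ segment_length ≠ 0
instance (max_e : Int) (mantissa_bits : Int) (segment_length : Int) : Decidable (Pre_compute_start_tables max_e mantissa_bits segment_length) := by unfold Pre_compute_start_tables; infer_instance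

def pvWitness_compute_start_tables : Int × Int × Int := (5, 3, 2)

def Spec_compute_start_tables (max_e : Int) (mantissa_bits : Int) (segment_length : Int) (out : List Int × (List (Int × Int))) : Prop := out = compute_start_tables_alt max_e mantissa_bits segment_length
instance (max_e : Int) (mantissa_bits : Int) (segment_length : Int) (out : List Int × (List (Int × Int))) : Decidable (Spec_compute_start_tables max_e mantissa_bits segment_length out) := by unfold Spec_compute_start_tables; infer_instance

-- ===== CLAIM (what is proved, stated in full; the proofs are below) =====
def Claim_equal_compute_start_tables : Prop := ∀ (max_e : Int) (mantissa_bits : Int) (segment_length : Int), Dom_compute_start_tables max_e mantissa_bits segment_length → Pre_compute_start_tables max_e mantissa_bits segment_length → Spec_compute_start_tables max_e mantissa_bits segment_length (compute_start_tables max_e mantissa_bits segment_length)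

-- ===== LEMMAS AND PROOFS =====

-- floor-division characterisations
lemma le_fdiv_iff {a b k : Int} (hb : 0 < b) : k ≤ PySem.Int.floordiv a b ↔ k * b ≤ a := by
  rw [PySem.Int.floordiv_eq_ediv_of_pos hb]; exact Int.le_ediv_iff_mul_le hb

lemma fdiv_le_iff {a b k : Int} (hb : 0 < b) : PySem.Int.floordiv a b ≤ k ↔ a < (k + 1) * b := by
  have h := le_fdiv_iff (a := a) (k := k + 1) hb
  constructor
  · intro h1; by_contra h2; omega
  · intro h1; by_contra h2; omega

lemma ceil_le_iff {c b x : Int} (hb : 0 < b) : -(PySem.Int.floordiv (-c) b) ≤ x ↔ c ≤ b * x := by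
  rw [neg_le, PySem.Int.floordiv_eq_ediv_of_pos hb, Int.le_ediv_iff_mul_le hb, neg_mul,
    neg_le_neg_iff, mul_comm]

lemma fdiv_nonneg {a b : Int} (hb : 0 < b) (ha : 0 ≤ a) : 0 ≤ PySem.Int.floordiv a b := by
  rw [le_fdiv_iff hb]; omega

lemma fdiv_anti {a1 a2 b : Int} (hb : b < 0) (h : a1 ≤ a2) :
    PySem.Int.floordiv a2 b ≤ PySem.Int.floordiv a1 b := by
  have h1 := PySem.Int.floordiv_mul_add_mod a1 b
  have h2 := PySem.Int.floordiv_mul_add_mod a2 b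
  have hm1 := PySem.Int.mod_neg_bounds a1 hb
  have hm2 := PySem.Int.mod_neg_bounds a2 hb
  by_contra h'
  have hq : PySem.Int.floordiv a1 b + 1 ≤ PySem.Int.floordiv a2 b :=
    Int.add_one_le_iff.mpr (lt_of_not_ge h')
  have hmul : PySem.Int.floordiv a2 b * b ≤ (PySem.Int.floordiv a1 b + 1) * b :=
    mul_le_mul_of_nonpos_right hq (le_of_lt hb)
  nlinarith

-- ndigAux basics
lemma ndigAux_shift (n d : Int) : ndigAux n d = ndigAux n 0 + d := by
  conv_rhs => rw [ndigAux]
  rw [ndigAux]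
  split
  · rename_i h
    rw [ndigAux_shift (PySem.Int.floordiv n 10) (d + 1),
        ndigAux_shift (PySem.Int.floordiv n 10) (0 + 1)]
    ring
  · ring
termination_by n.toNat
decreasing_by
  all_goals rw [PySem.Int.floordiv_eq_ediv_of_pos (by norm_num)]; omega

lemma ndig_nonneg (n : Int) : 0 ≤ ndigAux n 0 := by
  rw [ndigAux]
  split
  · rw [ndigAux_shift]
    have := ndig_nonneg (PySem.Int.floordiv n 10)
    omega
  · omega
termination_by n.toNat
decreasing_by rw [PySem.Int.floordiv_eq_ediv_of_pos (by norm_num)]; omega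

lemma ndig_le_iff (n : Int) (j : Nat) : ndigAux n 0 ≤ (j : Int) ↔ n < 10 ^ j := by
  rw [ndigAux]
  split
  · rename_i h
    rw [ndigAux_shift]
    cases j with
    | zero =>
      have := ndig_nonneg (PySem.Int.floordiv n 10)
      simp only [Nat.cast_zero, pow_zero]
      omega
    | succ j' =>
      have ih := ndig_le_iff (PySem.Int.floordiv n 10) j'
      rw [PySem.Int.floordiv_eq_ediv_of_pos (by norm_num)] at ih ⊢
      have hp : (10:Int) ^ (j' + 1) = 10 ^ j' * 10 := pow_succ 10 j'
      push_cast
      omega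
  · rename_i h
    have : (0:Int) < 10 ^ j := by positivity
    simp only [not_lt] at h
    constructor <;> intro <;> [omega; positivity]
termination_by n.toNat
decreasing_by rw [PySem.Int.floordiv_eq_ediv_of_pos (by norm_num)]; omega

lemma ndig_mono {x y : Int} (h : x ≤ y) : ndigAux x 0 ≤ ndigAux y 0 := by
  have hy := (ndig_le_iff y (ndigAux y 0).toNat).mp (by
    rw [Int.toNat_of_nonneg (ndig_nonneg y)])
  have hx := (ndig_le_iff x (ndigAux y 0).toNat).mpr (lt_of_le_of_lt h hy)
  rw [Int.toNat_of_nonneg (ndig_nonneg y)] at hx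
  exact hx

-- digitsPosLoop characterisation
lemma dpl_upper (v : Int) (d : Nat) : v < 10 ^ digitsPosLoop v d := by
  induction d using digitsPosLoop.induct (v := v) with
  | case1 d h ih => rw [digitsPosLoop]; simp only [h, dif_pos]; exact ih
  | case2 d h => rw [digitsPosLoop]; simp only [h, dif_neg, not_false_eq_true]; omega

lemma dpl_lower (v : Int) (d : Nat) :
    ∀ j, d ≤ j → j < digitsPosLoop v d → (10:Int) ^ j ≤ v := by
  induction d using digitsPosLoop.induct (v := v) with
  | case1 d h ih =>
    intro j h1 h2
    rw [digitsPosLoop] at h2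
    simp only [h, dif_pos] at h2
    rcases eq_or_lt_of_le h1 with h3 | h3
    · exact h3 ▸ h
    · exact ih j h3 h2
  | case2 d h =>
    intro j h1 h2
    rw [digitsPosLoop] at h2
    simp only [h, dif_neg, not_false_eq_true] at h2
    omega

lemma dpl_eq_ndig (v : Int) : (digitsPosLoop v 0 : Int) = ndigAux v 0 := by
  have hub : v < 10 ^ (ndigAux v 0).toNat :=
    (ndig_le_iff v (ndigAux v 0).toNat).mp (by rw [Int.toNat_of_nonneg (ndig_nonneg v)])
  have h1 : digitsPosLoop v 0 ≤ (ndigAux v 0).toNat := by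
    by_contra h'
    exact absurd (dpl_lower v 0 (ndigAux v 0).toNat (Nat.zero_le _) (lt_of_not_ge h')) (not_le.mpr hub)
  have h2 : ndigAux v 0 ≤ (digitsPosLoop v 0 : Int) :=
    (ndig_le_iff v (digitsPosLoop v 0)).mpr (dpl_upper v 0)
  have h3 := ndig_nonneg v
  omega

lemma fdiv_pow2_eq_zero_iff {x : Int} (k : Nat) (hx : 0 ≤ x) :
    PySem.Int.floordiv x (2 ^ k) = 0 ↔ x < 2 ^ k := by
  have hb : (0:Int) < 2 ^ k := by positivity
  constructor
  · intro h
    have := (fdiv_le_iff (a := x) (k := 0) hb).mp (le_of_eq h)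
    omega
  · intro h
    rw [PySem.Int.floordiv_eq_ediv_of_pos hb]
    exact Int.ediv_eq_zero_of_lt hx h

-- digitsNegLoop characterisation (for 1 ≤ m): least j with 2^k ≤ m * 10^j
lemma dnl_upper {m : Int} (hm : 1 ≤ m) (k : Nat) (d : Nat) :
    (2:Int) ^ k ≤ m * 10 ^ digitsNegLoop m k d := by
  induction d using digitsNegLoop.induct (m := m) (k := k) with
  | case1 d h ih => rw [digitsNegLoop]; simp only [h, dif_pos]; exact ih
  | case2 d h =>
    rw [digitsNegLoop]; simp only [h, dif_neg, not_false_eq_true]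
    have h2 : ¬ PySem.Int.floordiv (m * 10 ^ d) (2 ^ k) = 0 := fun hc => h ⟨hm, hc⟩
    have h3 : (0:Int) ≤ m * 10 ^ d := by positivity
    have := (fdiv_pow2_eq_zero_iff k h3).not.mp h2
    omega

lemma dnl_lower {m : Int} (k : Nat) (d : Nat) :
    ∀ j, d ≤ j → j < digitsNegLoop m k d → m * 10 ^ j < 2 ^ k := by
  induction d using digitsNegLoop.induct (m := m) (k := k) with
  | case1 d h ih =>
    intro j h1 h2
    rw [digitsNegLoop] at h2
    simp only [h, dif_pos] at h2
    rcases eq_or_lt_of_le h1 with h3 | h3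
    · rw [← h3]
      have h4 : (0:Int) ≤ m * 10 ^ d := mul_nonneg (by linarith [h.1]) (by positivity)
      exact (fdiv_pow2_eq_zero_iff k h4).mp h.2
    · exact ih j h3 h2
  | case2 d h =>
    intro j h1 h2
    rw [digitsNegLoop] at h2
    simp only [h, dif_neg, not_false_eq_true] at h2
    omega

-- Source B's ceiling count: n = ceil(2^k / m)
lemma n_le_iff {m : Int} (hm : 1 ≤ m) (k : Nat) (x : Int) :
    PySem.Int.floordiv (2 ^ k + m - 1) m ≤ x ↔ (2:Int) ^ k ≤ m * x := by
  rw [fdiv_le_iff (by omega)]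
  have hexp : (x + 1) * m = x * m + m := by ring
  have hc : m * x = x * m := mul_comm m x
  omega

-- Source B's digit count for the e < 0 branch, as a function of n
lemma dB_le_iff {m : Int} (hm : 1 ≤ m) (k : Nat) (j : Nat) :
    (if PySem.Int.floordiv (2 ^ k + m - 1) m ≤ 1 then (0:Int)
      else ndigAux (PySem.Int.floordiv (2 ^ k + m - 1) m - 1) 0) ≤ (j : Int)
    ↔ PySem.Int.floordiv (2 ^ k + m - 1) m ≤ 10 ^ j := by
  set n := PySem.Int.floordiv (2 ^ k + m - 1) m with hn
  split
  · rename_i h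
    have : (1:Int) ≤ 10 ^ j := one_le_pow₀ (by norm_num)
    constructor <;> intro <;> [omega; positivity]
  · rename_i h
    rw [ndig_le_iff]
    omega

lemma dnl_eq_dB {m : Int} (hm : 1 ≤ m) (k : Nat) :
    (digitsNegLoop m k 0 : Int)
      = (if PySem.Int.floordiv (2 ^ k + m - 1) m ≤ 1 then (0:Int)
          else ndigAux (PySem.Int.floordiv (2 ^ k + m - 1) m - 1) 0) := by
  set n := PySem.Int.floordiv (2 ^ k + m - 1) m with hn
  set dB : Int := if n ≤ 1 then (0:Int) else ndigAux (n - 1) 0 with hdB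
  have hdB0 : 0 ≤ dB := by
    rw [hdB]; split
    · exact le_rfl
    · exact ndig_nonneg _
  have hsat : (2:Int) ^ k ≤ m * 10 ^ dB.toNat := by
    rw [← n_le_iff hm k]
    have := (dB_le_iff hm k dB.toNat).mp (by rw [Int.toNat_of_nonneg hdB0])
    exact this
  have h1 : digitsNegLoop m k 0 ≤ dB.toNat := by
    by_contra h'
    have h2 := dnl_lower (m := m) k 0 dB.toNat (Nat.zero_le _) (lt_of_not_ge h')
    omega
  have h2 : dB ≤ (digitsNegLoop m k 0 : Int) := by
    rw [hdB]
    rw [show ((digitsNegLoop m k 0 : Nat) : Int) = ((digitsNegLoop m k 0 : Nat) : Int) from rfl]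
    have hsat2 : n ≤ 10 ^ digitsNegLoop m k 0 := (n_le_iff hm k _).mpr (dnl_upper hm k 0)
    have := (dB_le_iff hm k (digitsNegLoop m k 0)).mpr hsat2
    rw [← hdB] at this
    exact this
  omega

lemma seg_eq (L m e : Int) (hm : 1 ≤ m) : calcSegment L m e = segAlt L m e := by
  unfold calcSegment segAlt
  split
  · rw [dpl_eq_ndig]
  · rw [dnl_eq_dB hm]

-- binary search: with a threshold callback it returns the least element satisfying it
lemma ub_char (low high : Int) (cb : Int → Bool) (t : Int) (last : Option Int)
    (hcb : ∀ m, low ≤ m → m ≤ high → (cb m = true ↔ t ≤ m))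
    (h1 : low ≤ t) (h2 : t ≤ high + 1) :
    upperBound low high cb last = if t ≤ high then some t else last := by
  rw [upperBound]
  split
  · rename_i hlh
    have hb := PySem.Int.floordiv_two_mid_bounds hlh
    rw [add_comm low high] at hb
    set mid := PySem.Int.floordiv (high + low) 2 with hmid
    by_cases hc : cb mid = true
    · have htm : t ≤ mid := (hcb mid hb.1 hb.2).mp hc
      rw [if_pos hc]
      rw [ub_char low (mid - 1) cb t (some mid)
        (fun m hm1 hm2 => hcb m hm1 (by omega)) h1 (by omega)]
      split <;> rename_i h3
      · rw [if_pos (by omega)]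
      · have : t = mid := by omega
        rw [if_pos (by omega), this]
    · have htm : mid < t := by
        by_contra h'
        exact hc ((hcb mid hb.1 hb.2).mpr (by omega))
      rw [if_neg hc]
      rw [ub_char (mid + 1) high cb t last
        (fun m hm1 hm2 => hcb m (by omega) hm2) (by omega) h2]
  · rename_i hlh
    rw [if_neg (by omega)]
termination_by (high + 1 - low).toNat
decreasing_by
  · have hb := PySem.Int.floordiv_two_mid_bounds ‹low ≤ high›
    rw [add_comm low high] at hb
    omega
  · have hb := PySem.Int.floordiv_two_mid_bounds ‹low ≤ high›
    rw [add_comm low high] at hb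
    omega

lemma two_pow_le {a b : Nat} (h : a ≤ b) : (2:Int) ^ a ≤ 2 ^ b :=
  pow_le_pow_right₀ (by norm_num) h

lemma thresh_eq (L : Int) (a : Nat) (e : Int) (hL : 0 < L)
    (hk : e < 0 → a + 1 ≤ (-e).toNat)
    (hcross : segAlt L (2 ^ a) e + 1 = segAlt L (2 ^ (a + 1) - 1) e) :
    (upperBound (2 ^ a) (2 ^ (a + 1) - 1)
        (fun m => decide (segAlt L (2 ^ a) e < calcSegment L m e)) none).getD 0
    = (if 0 ≤ e then
        -(PySem.Int.floordiv (-(10 ^ ((segAlt L (2 ^ a) e + 1) * L).toNat)) (2 ^ e.toNat))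
      else
        -(PySem.Int.floordiv (-(2 ^ (-e).toNat)) (10 ^ ((-(segAlt L (2 ^ a) e)) * L).toNat))) := by
  have hlow1 : (1:Int) ≤ 2 ^ a := one_le_pow₀ (by norm_num)
  have hlohi : (2:Int) ^ a ≤ 2 ^ (a + 1) - 1 := by
    have : (2:Int) ^ (a + 1) = 2 ^ a * 2 := pow_succ 2 a
    omega
  set s := segAlt L (2 ^ a) e with hs
  by_cases he : 0 ≤ e
  · -- positive exponent
    set P := ((s + 1) * L).toNat with hPdef
    -- s ≥ 0
    have hnd1 : 1 ≤ ndigAux (2 ^ a * 2 ^ e.toNat) 0 := by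
      have h0 := (ndig_le_iff (2 ^ a * 2 ^ e.toNat) 0).not.mpr (by
        simp only [pow_zero, not_lt]
        have h1 : (0:Int) < 2 ^ a * 2 ^ e.toNat := by positivity
        omega)
      omega
    have hs0 : 0 ≤ s := by
      rw [hs]
      simp only [segAlt, if_pos he]
      exact fdiv_nonneg hL (by omega)
    have hP : ((s + 1) * L) = (P : Int) := (Int.toNat_of_nonneg (mul_nonneg (by omega) (by omega))).symm
    set tB : Int := -(PySem.Int.floordiv (-(10 ^ P)) (2 ^ e.toNat)) with htB
    have hcb : ∀ m, 2 ^ a ≤ m → m ≤ 2 ^ (a + 1) - 1 →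
        ((fun m => decide (s < calcSegment L m e)) m = true ↔ tB ≤ m) := by
      intro m hm1 hm2
      have hm : (1:Int) ≤ m := le_trans hlow1 hm1
      simp only [decide_eq_true_eq]
      rw [seg_eq L m e hm]
      simp only [segAlt, if_pos he]
      rw [show (s < PySem.Int.floordiv (ndigAux (m * 2 ^ e.toNat) 0 - 1) L)
            ↔ (s + 1 ≤ PySem.Int.floordiv (ndigAux (m * 2 ^ e.toNat) 0 - 1) L) from by omega]
      rw [le_fdiv_iff hL, hP]
      rw [show ((P:Int) ≤ ndigAux (m * 2 ^ e.toNat) 0 - 1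
            ↔ ¬ (ndigAux (m * 2 ^ e.toNat) 0 ≤ (P:Int))) from by omega]
      rw [ndig_le_iff, not_lt, htB, ceil_le_iff (by positivity), mul_comm m (2 ^ e.toNat)]
    have hlowf : ¬ (tB ≤ 2 ^ a) := by
      intro hc
      have := (hcb (2 ^ a) le_rfl hlohi).mpr hc
      simp only [decide_eq_true_eq] at this
      rw [seg_eq L (2 ^ a) e hlow1, ← hs] at this
      omega
    have hhighf : tB ≤ 2 ^ (a + 1) - 1 := by
      have := (hcb (2 ^ (a + 1) - 1) hlohi le_rfl)
      simp only [decide_eq_true_eq] at this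
      rw [seg_eq L (2 ^ (a + 1) - 1) e (by omega), ← hcross] at this
      exact this.mp (by omega)
    rw [if_pos he]
    rw [ub_char _ _ _ tB none hcb (by omega) (by omega), if_pos hhighf]
    rfl
  · -- negative exponent
    have hee : e < 0 := by omega
    set k := (-e).toNat with hkdef
    have hka : a + 1 ≤ k := hk hee
    have h2k : (2:Int) ^ (a + 1) ≤ 2 ^ k := two_pow_le hka
    have hseg : ∀ m : Int, 1 ≤ m → segAlt L m e =
        -(PySem.Int.floordiv
            ((if PySem.Int.floordiv (2 ^ k + m - 1) m ≤ 1 then (0:Int)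
              else ndigAux (PySem.Int.floordiv (2 ^ k + m - 1) m - 1) 0) - 1) L) := by
      intro m hm
      simp only [segAlt, if_neg he]
      rw [← hkdef]
    -- the digit count at the lower mantissa is ≥ 1, so s ≤ 0
    have hnmin : ¬ (PySem.Int.floordiv (2 ^ k + 2 ^ a - 1) (2 ^ a) ≤ 1) := by
      rw [n_le_iff hlow1 k]
      have : (2:Int) ^ (a + 1) = 2 ^ a * 2 := pow_succ 2 a
      omega
    have hd1 : 1 ≤ ndigAux (PySem.Int.floordiv (2 ^ k + 2 ^ a - 1) (2 ^ a) - 1) 0 := by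
      have h0 := (ndig_le_iff (PySem.Int.floordiv (2 ^ k + 2 ^ a - 1) (2 ^ a) - 1) 0).not.mpr (by
        simp only [pow_zero, not_lt]
        omega)
      omega
    have hs0 : s ≤ 0 := by
      rw [hs, hseg (2 ^ a) hlow1, if_neg hnmin]
      have := fdiv_nonneg hL (a := ndigAux (PySem.Int.floordiv (2 ^ k + 2 ^ a - 1) (2 ^ a) - 1) 0 - 1) (by omega)
      omega
    set T := ((-s) * L).toNat with hTdef
    have hT : ((-s) * L) = (T : Int) := (Int.toNat_of_nonneg (mul_nonneg (by omega) (by omega))).symm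
    set tB : Int := -(PySem.Int.floordiv (-(2 ^ k)) (10 ^ T)) with htB
    have hcb : ∀ m, 2 ^ a ≤ m → m ≤ 2 ^ (a + 1) - 1 →
        ((fun m => decide (s < calcSegment L m e)) m = true ↔ tB ≤ m) := by
      intro m hm1 hm2
      have hm : (1:Int) ≤ m := le_trans hlow1 hm1
      simp only [decide_eq_true_eq]
      rw [seg_eq L m e hm, hseg m hm]
      rw [show (s < -(PySem.Int.floordiv
              ((if PySem.Int.floordiv (2 ^ k + m - 1) m ≤ 1 then (0:Int)
                else ndigAux (PySem.Int.floordiv (2 ^ k + m - 1) m - 1) 0) - 1) L))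
          ↔ (PySem.Int.floordiv
              ((if PySem.Int.floordiv (2 ^ k + m - 1) m ≤ 1 then (0:Int)
                else ndigAux (PySem.Int.floordiv (2 ^ k + m - 1) m - 1) 0) - 1) L ≤ -s - 1) from by omega]
      rw [fdiv_le_iff hL]
      rw [show ((-s - 1 + 1) * L) = (-s) * L from by ring, hT]
      rw [show ((if PySem.Int.floordiv (2 ^ k + m - 1) m ≤ 1 then (0:Int)
                else ndigAux (PySem.Int.floordiv (2 ^ k + m - 1) m - 1) 0) - 1 < (T:Int)
            ↔ (if PySem.Int.floordiv (2 ^ k + m - 1) m ≤ 1 then (0:Int)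
                else ndigAux (PySem.Int.floordiv (2 ^ k + m - 1) m - 1) 0) ≤ (T:Int)) from by omega]
      rw [dB_le_iff hm k T, n_le_iff hm k, htB, ceil_le_iff (by positivity), mul_comm m (10 ^ T)]
    have hlowf : ¬ (tB ≤ 2 ^ a) := by
      intro hc
      have := (hcb (2 ^ a) le_rfl hlohi).mpr hc
      simp only [decide_eq_true_eq] at this
      rw [seg_eq L (2 ^ a) e hlow1, ← hs] at this
      omega
    have hhighf : tB ≤ 2 ^ (a + 1) - 1 := by
      have := (hcb (2 ^ (a + 1) - 1) hlohi le_rfl)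
      simp only [decide_eq_true_eq] at this
      rw [seg_eq L (2 ^ (a + 1) - 1) e (by omega), ← hcross] at this
      exact this.mp (by omega)
    rw [if_neg he]
    rw [ub_char _ _ _ tB none hcb (by omega) (by omega), if_pos hhighf]
    rfl

lemma segAlt_anti {L : Int} (hL : L < 0) {m1 m2 : Int} (e : Int) (hm1 : 1 ≤ m1) (h12 : m1 ≤ m2) :
    segAlt L m2 e ≤ segAlt L m1 e := by
  by_cases he : 0 ≤ e
  · simp only [segAlt, if_pos he]
    have hmono : ndigAux (m1 * 2 ^ e.toNat) 0 ≤ ndigAux (m2 * 2 ^ e.toNat) 0 :=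
      ndig_mono (by nlinarith [pow_pos (show (0:Int) < 2 from by norm_num) e.toNat])
    exact fdiv_anti hL (by omega)
  · simp only [segAlt, if_neg he]
    set k := (-e).toNat with hkdef
    set n1 := PySem.Int.floordiv (2 ^ k + m1 - 1) m1 with hn1
    set n2 := PySem.Int.floordiv (2 ^ k + m2 - 1) m2 with hn2
    have hm2 : (1:Int) ≤ m2 := le_trans hm1 h12
    have hsat : (2:Int) ^ k ≤ m1 * n1 := (n_le_iff hm1 k n1).mp le_rfl
    have hn1pos : 1 ≤ n1 := by
      by_contra h'
      have h0 : m1 * n1 ≤ 0 := mul_nonpos_of_nonneg_of_nonpos (by omega) (by omega)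
      have : (0:Int) < 2 ^ k := by positivity
      omega
    have hanti : n2 ≤ n1 := by
      rw [hn2, n_le_iff hm2 k]
      calc (2:Int) ^ k ≤ m1 * n1 := hsat
        _ ≤ m2 * n1 := mul_le_mul_of_nonneg_right h12 (by omega)
    have hdmono : (if n2 ≤ 1 then (0:Int) else ndigAux (n2 - 1) 0)
        ≤ (if n1 ≤ 1 then (0:Int) else ndigAux (n1 - 1) 0) := by
      split
      · split
        · exact le_rfl
        · have := ndig_nonneg (n1 - 1); omega
      · rename_i h2
        rw [if_neg (by omega)]
        exact ndig_mono (by omega)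
    have := fdiv_anti hL (show (if n2 ≤ 1 then (0:Int) else ndigAux (n2 - 1) 0) - 1
        ≤ (if n1 ≤ 1 then (0:Int) else ndigAux (n1 - 1) 0) - 1 from by omega)
    omega

lemma foldB_len {α β : Type} (f : Int → α) (u : Int → β → β) :
    ∀ (l : List Int) (acc : List α) (t0 : β),
    (List.foldl (fun (st : List α × β) i => (st.1 ++ [f i], u i st.2)) (acc, t0) l).1.length
      = acc.length + l.length := by
  intro l
  induction l with
  | nil => intro acc t0; simp
  | cons x xs ih =>
    intro acc t0
    simp only [List.foldl_cons, ih, List.length_append, List.length_cons]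
    simp
    omega

lemma fold_set_eq_append {α β : Type} (dfl : α) (f : Int → α) (u : Int → β → β) :
    ∀ (n : Nat) (rest : List α) (t0 : β),
    List.foldl (fun (st : List α × β) i => (st.1.set i.toNat (f i), u i st.2))
      (List.replicate n dfl ++ rest, t0) ((List.range n).map Int.ofNat)
    = ((List.foldl (fun (st : List α × β) i => (st.1 ++ [f i], u i st.2)) (([] : List α), t0)
          ((List.range n).map Int.ofNat)).1 ++ rest,
       (List.foldl (fun (st : List α × β) i => (st.1 ++ [f i], u i st.2)) (([] : List α), t0)
          ((List.range n).map Int.ofNat)).2) := by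
  intro n
  induction n with
  | zero => intro rest t0; simp
  | succ n ih =>
    intro rest t0
    rw [List.range_succ, List.map_append, List.foldl_append, List.foldl_append]
    rw [show List.replicate (n + 1) dfl ++ rest = List.replicate n dfl ++ (dfl :: rest) from by
      rw [List.replicate_succ']; simp]
    rw [ih (dfl :: rest) t0]
    have hlen : (List.foldl (fun (st : List α × β) i => (st.1 ++ [f i], u i st.2)) (([] : List α), t0)
        ((List.range n).map Int.ofNat)).1.length = n := by
      rw [foldB_len]; simp
    simp only [List.map_cons, List.map_nil, List.foldl_cons, List.foldl_nil]
    set p := List.foldl (fun (st : List α × β) i => (st.1 ++ [f i], u i st.2)) (([] : List α), t0)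
        ((List.range n).map Int.ofNat) with hp
    rw [show (Int.ofNat n).toNat = n from by simp, ← hlen]
    simp [List.set_append]

lemma main_eq (max_e : Int) (a : Nat) (L : Int) (hL : L ≠ 0) :
    compute_start_tables max_e (a : Int) L = compute_start_tables_alt max_e (a : Int) L := by
  have hpow : (2:Int) ^ (a + 1) = 2 ^ a * 2 := pow_succ 2 a
  have hminm1 : (1:Int) ≤ 2 ^ a := one_le_pow₀ (by norm_num)
  have hmaxm1 : (1:Int) ≤ 2 ^ (a + 1) - 1 := by omega
  have habs : (0:Int) ≤ |max_e| := abs_nonneg max_e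
  set isp := decide (0 ≤ max_e) with hisp
  set expo : Int → Int := fun i => if isp = true then i else -(i + (a : Int) + 1) with hexpo
  have hke : ∀ i : Int, 0 ≤ i → (expo i < 0 → a + 1 ≤ (-(expo i)).toNat) := by
    intro i hi h
    rw [hexpo]
    dsimp only
    split
    · rw [hexpo] at h; dsimp only at h; split at h <;> omega
    · omega
  set f : Int → Int := fun i =>
    min |segAlt L (2 ^ a) (expo i)| |segAlt L (2 ^ (a + 1) - 1) (expo i)| with hf
  set u : Int → List (Int × Int) → List (Int × Int) := fun i t =>
    if segAlt L (2 ^ a) (expo i) + 1 = segAlt L (2 ^ (a + 1) - 1) (expo i) then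
      t.set (min |segAlt L (2 ^ a) (expo i)| |segAlt L (2 ^ (a + 1) - 1) (expo i)|).toNat
        ((if 0 ≤ expo i then
            -(PySem.Int.floordiv (-(10 ^ ((segAlt L (2 ^ a) (expo i) + 1) * L).toNat)) (2 ^ (expo i).toNat))
          else
            -(PySem.Int.floordiv (-(2 ^ (-(expo i)).toNat)) (10 ^ ((-(segAlt L (2 ^ a) (expo i))) * L).toNat))),
         |expo i|)
    else t with hu
  -- the threshold value of A equals B's closed form, under the crossing hypothesis
  have hthr : ∀ i : Int, 0 ≤ i →
      segAlt L (2 ^ a) (expo i) + 1 = segAlt L (2 ^ (a + 1) - 1) (expo i) →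
      (upperBound (2 ^ a) (2 ^ (a + 1) - 1)
          (fun m => decide (segAlt L (2 ^ a) (expo i) < calcSegment L m (expo i))) none).getD 0
      = (if 0 ≤ expo i then
          -(PySem.Int.floordiv (-(10 ^ ((segAlt L (2 ^ a) (expo i) + 1) * L).toNat)) (2 ^ (expo i).toNat))
        else
          -(PySem.Int.floordiv (-(2 ^ (-(expo i)).toNat)) (10 ^ ((-(segAlt L (2 ^ a) (expo i))) * L).toNat))) := by
    intro i hi hcross
    rcases lt_or_gt_of_ne hL with hneg | hpos
    · exact absurd hcross (by
        have := segAlt_anti hneg (expo i) hminm1 (show (2:Int) ^ a ≤ 2 ^ (a + 1) - 1 from by omega)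
        omega)
    · exact thresh_eq L a (expo i) hpos (hke i hi) hcross
  show compute_start_tables max_e (a : Int) L = compute_start_tables_alt max_e (a : Int) L
  simp only [compute_start_tables, compute_start_tables_alt]
  rw [show ((a : Int) + 1).toNat = a + 1 from by omega, Int.toNat_natCast]
  rw [seg_eq L (2 ^ (a + 1) - 1) |max_e| hmaxm1]
  set N := (|max_e| + 1).toNat with hN
  rw [show |max_e| + 1 = ((N : Nat) : Int) from by omega, PySem.List.pyRange_zero_natCast]
  rw [show (List.map (fun k : Nat => (k : Int)) (List.range N)) = (List.range N).map Int.ofNat from by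
    simp [Int.ofNat_eq_natCast]]
  set thr0 : List (Int × Int) := List.replicate (segAlt L (2 ^ (a + 1) - 1) |max_e|).toNat (0, ((N : Nat) : Int)) with hthr0
  rw [PySem.List.foldl_congr_mem _ _ (fun (st : List Int × List (Int × Int)) i =>
        (st.1.set i.toNat (f i), u i st.2)) _ ?ha]
  rw [PySem.List.foldl_congr_mem _ _ (fun (st : List Int × List (Int × Int)) i =>
        (st.1 ++ [f i], u i st.2)) (([] : List Int), thr0) ?hb]
  · rw [show List.replicate N (0:Int) = List.replicate N (0:Int) ++ [] from by simp]
    rw [fold_set_eq_append (0:Int) f u N [] thr0]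
    simp
  · -- B's step is the common step
    intro st x hx
    have hcomm : ∀ (c : Prop) (inst : Decidable c) (s1 : List Int) (t1 t2 : List (Int × Int)),
        (if c then (s1, t1) else (s1, t2)) = (s1, if c then t1 else t2) := by
      intro c inst s1 t1 t2
      split <;> rfl
    simp only [hu, hf, hexpo, hisp]
    rw [hcomm]
  · -- A's step is the common step
    intro st x hx
    have hx0 : 0 ≤ x := by
      simp only [List.mem_map, List.mem_range] at hx
      obtain ⟨k, _, rfl⟩ := hx
      simp [Int.ofNat_eq_natCast]
    have hex : (if decide (0 ≤ max_e) = true then x else -(x + (a : Int) + 1)) = expo x := by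
      simp only [hexpo, hisp]
    have h1 := seg_eq L (2 ^ a) (expo x) hminm1
    have h2 := seg_eq L (2 ^ (a + 1) - 1) (expo x) hmaxm1
    dsimp only
    simp only [hex, h1, h2, hf, hu]
    split
    · rename_i hcr
      rw [hthr x hx0 hcr]
    · rfl

-- ===== VERDICT (by name: the statement is the Claim_ definition above) =====
theorem compute_start_tables_spec : Claim_equal_compute_start_tables := by
  intro max_e mantissa_bits segment_length hdom hpre
  obtain ⟨hmb, hL⟩ := hpre
  unfold Spec_compute_start_tables
  obtain ⟨a, rfl⟩ : ∃ a : Nat, mantissa_bits = (a : Int) := ⟨mantissa_bits.toNat, by omega⟩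
  exact main_eq max_e a segment_length hL
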